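-- pv_equiv track=rewrite | github.com/dojorio/dojo-centro | 2012/20120919 - numpuzz - python/numpuzz.py | numpuzz
-- ===== SOURCE A (Python) =====
-- def numpuzz(passos, lado=3):
--     area = lado*lado
--     resultado = [0]*area
--
--     def adicionar(posicao):
--         if 0 <= posicao < area:
--             resultado[posicao] += 1
--             resultado[posicao] %= 10
--
--     for passo in passos:
--         esquerda = passo - 1
--         direita = passo + 1
--         cima = passo - lado
--         baixo = passo + lado
--
--         adicionar(passo)
--         adicionar(cima)
--         adicionar(baixo)
--
--         if passo % lado:
--             adicionar(esquerda)
--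
--         if (passo + 1) % lado:
--             adicionar(direita)
--
--     return resultado
-- ===== SOURCE B (Python) =====
-- def _cell_value(count, lado, i):
--     total = count.get(i, 0) + count.get(i + lado, 0) + count.get(i - lado, 0)
--     if (i + 1) % lado:
--         total += count.get(i + 1, 0)
--     if i % lado:
--         total += count.get(i - 1, 0)
--     return total % 10
--
--
-- def numpuzz(passos, lado=3):
--     area = lado * lado
--     count = {}
--     for p in passos:
--         count[p] = count.get(p, 0) + 1
--     resultado = [0] * area
--     for p in count:
--         for i in (p, p - 1, p + 1, p - lado, p + lado):
--             if 0 <= i < area: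
--                 resultado[i] = _cell_value(count, lado, i)
--     return resultado
-- ===== Notes on version B (the rewrite author's own statement) =====
-- stated objective: alternative
-- what changed: B replaces A's scatter loop (each step incrementing up to five cells with per-increment mod) by a gather: build a frequency dict of the steps once, then compute each cell's value as the mod-10 sum of the counts of the five step positions that would hit it.
import Mathlib
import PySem

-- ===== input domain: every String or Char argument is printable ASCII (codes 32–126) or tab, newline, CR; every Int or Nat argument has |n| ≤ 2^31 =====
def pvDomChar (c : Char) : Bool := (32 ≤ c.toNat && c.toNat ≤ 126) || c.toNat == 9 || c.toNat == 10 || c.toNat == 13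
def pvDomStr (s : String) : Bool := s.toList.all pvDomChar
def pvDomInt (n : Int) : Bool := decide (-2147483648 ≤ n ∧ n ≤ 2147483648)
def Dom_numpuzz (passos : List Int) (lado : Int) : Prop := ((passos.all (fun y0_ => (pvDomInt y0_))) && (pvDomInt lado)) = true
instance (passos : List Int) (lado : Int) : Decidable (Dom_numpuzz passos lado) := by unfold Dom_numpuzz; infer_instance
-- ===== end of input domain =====

-- B replaces A's scatter loop by a gather over cells reading a step-frequency dict: an alternative decomposition of the same cost.

-- ===== PORT A =====
-- adicionar: in-grid positions get += 1 then %= 10 (divisor 10 > 0, so Lean's % is Python-exact here)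
def pvAdicionar (area : Int) (res : List Int) (pos : Int) : List Int :=
  if 0 ≤ pos ∧ pos < area then
    res.set pos.toNat ((res.getD pos.toNat 0 + 1) % 10)
  else res

-- body of A's 'for passo in passos' loop: the five adicionar calls, the last two guarded
def pvStep (lado : Int) (res : List Int) (passo : Int) : List Int :=
  let area := lado * lado
  let res := pvAdicionar area res passo
  let res := pvAdicionar area res (passo - lado)
  let res := pvAdicionar area res (passo + lado)
  let res := if PySem.Int.mod passo lado ≠ 0 then pvAdicionar area res (passo - 1) else res
  if PySem.Int.mod (passo + 1) lado ≠ 0 then pvAdicionar area res (passo + 1) else res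

def numpuzz (passos : List Int) (lado : Int) : List Int :=
  passos.foldl (pvStep lado) (List.replicate (lado * lado).toNat 0)

-- ===== PORT B =====
-- _cell_value: the value of cell i gathered from the step-frequency dict
def pvCellValue (count : PySem.Dict Int Int) (lado i : Int) : Int :=
  let total := count.getD i 0 + count.getD (i + lado) 0 + count.getD (i - lado) 0
  let total := if PySem.Int.mod (i + 1) lado ≠ 0 then total + count.getD (i + 1) 0 else total
  let total := if PySem.Int.mod i lado ≠ 0 then total + count.getD (i - 1) 0 else total
  total % 10

def numpuzz_alt (passos : List Int) (lado : Int) : List Int :=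
  let area := lado * lado
  let count := passos.foldl (fun d p => d.insert p (d.getD p 0 + 1)) PySem.Dict.empty
  count.keys.foldl (fun res p =>
    [p, p - 1, p + 1, p - lado, p + lado].foldl (fun res i =>
      if 0 ≤ i ∧ i < area then res.set i.toNat (pvCellValue count lado i) else res) res)
    (List.replicate area.toNat 0)

-- ===== PRECONDITION & SPEC =====
-- Pre_ excludes only lado = 0 with nonempty passos, where A raises ZeroDivisionError at 'passo % lado'.
def Pre_numpuzz (passos : List Int) (lado : Int) : Prop := passos = [] ∨ lado ≠ 0
instance (passos : List Int) (lado : Int) : Decidable (Pre_numpuzz passos lado) := by unfold Pre_numpuzz; infer_instance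
def pvWitness_numpuzz : List Int × Int := ([0, 1, 4, 8, 4], 3)

def Spec_numpuzz (passos : List Int) (lado : Int) (out : List Int) : Prop := out = numpuzz_alt passos lado
instance (passos : List Int) (lado : Int) (out : List Int) : Decidable (Spec_numpuzz passos lado out) := by unfold Spec_numpuzz; infer_instance

-- ===== CLAIM (what is proved, stated in full; the proofs are below) =====
def Claim_equal_numpuzz : Prop := ∀ (passos : List Int) (lado : Int), Dom_numpuzz passos lado → Pre_numpuzz passos lado → Spec_numpuzz passos lado (numpuzz passos lado)

-- ===== LEMMAS AND PROOFS =====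

-- contribution of one step p to cell i, read off A's five adicionar calls
def pvG (lado p i : Int) : Int :=
  (if p = i then 1 else 0) + (if p - lado = i then 1 else 0) + (if p + lado = i then 1 else 0)
  + (if PySem.Int.mod p lado ≠ 0 ∧ p - 1 = i then 1 else 0)
  + (if PySem.Int.mod (p + 1) lado ≠ 0 ∧ p + 1 = i then 1 else 0)

-- total contribution of the steps ps to cell i
def pvS (lado : Int) (ps : List Int) (i : Int) : Int := (ps.map (fun p => pvG lado p i)).sum

lemma pvAdicionar_map (area : Int) (h : Nat → Int) (pos : Int) :
    pvAdicionar area ((List.range area.toNat).map (fun j => h j % 10)) pos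
      = (List.range area.toNat).map (fun j => (h j + if pos = (j : Int) then 1 else 0) % 10) := by
  unfold pvAdicionar
  split_ifs with hin
  · obtain ⟨h0, h1⟩ := hin
    have hlt : pos.toNat < area.toNat := by omega
    apply List.ext_getElem
    · simp
    · intro k hk hk'
      simp only [List.length_map, List.length_range] at hk'
      rw [List.getElem_set]
      simp only [List.getElem_map, List.getElem_range]
      by_cases hpk : pos.toNat = k
      · have hik : pos = (k : Int) := by omega
        subst hpk
        rw [if_pos rfl, if_pos hik]
        rw [List.getD_eq_getElem _ _ (by simpa using hlt)]
        simp only [List.getElem_map, List.getElem_range]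
        omega
      · have : ¬ (pos = (k : Int)) := by omega
        rw [if_neg hpk, if_neg this, add_zero]
  · apply List.map_congr_left
    intro j hj
    simp only [List.mem_range] at hj
    have : ¬ (pos = (j : Int)) := by omega
    rw [if_neg this, add_zero]

lemma pvStep_map (lado p : Int) (h : Nat → Int) :
    pvStep lado ((List.range (lado * lado).toNat).map (fun j => h j % 10)) p
      = (List.range (lado * lado).toNat).map (fun j => (h j + pvG lado p (j : Int)) % 10) := by
  unfold pvStep
  dsimp only
  by_cases c1 : PySem.Int.mod p lado ≠ 0 <;> by_cases c2 : PySem.Int.mod (p + 1) lado ≠ 0 <;>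
    simp only [c1, c2, if_true, if_false, not_false_eq_true, ne_eq] <;>
    (try rw [pvAdicionar_map]) <;> (try rw [pvAdicionar_map]) <;>
    (try rw [pvAdicionar_map]) <;> (try rw [pvAdicionar_map]) <;>
    (try rw [pvAdicionar_map]) <;>
    refine List.map_congr_left (fun j hj => ?_) <;>
    simp [pvG, c1, c2] <;> ring_nf

lemma pv_foldA (lado : Int) (ps : List Int) (h : Nat → Int) :
    ps.foldl (pvStep lado) ((List.range (lado * lado).toNat).map (fun j => h j % 10))
      = (List.range (lado * lado).toNat).map (fun j => (h j + pvS lado ps (j : Int)) % 10) := by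
  induction ps generalizing h with
  | nil => simp [pvS]
  | cons p ps ih =>
    rw [List.foldl_cons, pvStep_map, ih (fun j => h j + pvG lado p (j : Int))]
    refine List.map_congr_left (fun j hj => ?_)
    simp [pvS]
    ring_nf

-- pvG re-expressed from the receiving cell's point of view (B's gather)
lemma pvG_eq (lado p i : Int) :
    pvG lado p i
      = (if p = i then 1 else 0) + (if p = i + lado then 1 else 0) + (if p = i - lado then 1 else 0)
        + (if PySem.Int.mod (i + 1) lado ≠ 0 then (if p = i + 1 then (1:Int) else 0) else 0)
        + (if PySem.Int.mod i lado ≠ 0 then (if p = i - 1 then (1:Int) else 0) else 0) := by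
  have h2 : (if p - lado = i then (1:Int) else 0) = (if p = i + lado then 1 else 0) := by
    split_ifs <;> omega
  have h3 : (if p + lado = i then (1:Int) else 0) = (if p = i - lado then 1 else 0) := by
    split_ifs <;> omega
  have h4 : (if PySem.Int.mod p lado ≠ 0 ∧ p - 1 = i then (1:Int) else 0)
      = (if PySem.Int.mod (i + 1) lado ≠ 0 then (if p = i + 1 then (1:Int) else 0) else 0) := by
    by_cases hp : p = i + 1
    · subst hp
      by_cases c : PySem.Int.mod (i + 1) lado ≠ 0 <;> simp [c]
    · have hni : p - 1 ≠ i := by omega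
      simp [hni, hp]
  have h5 : (if PySem.Int.mod (p + 1) lado ≠ 0 ∧ p + 1 = i then (1:Int) else 0)
      = (if PySem.Int.mod i lado ≠ 0 then (if p = i - 1 then (1:Int) else 0) else 0) := by
    by_cases hp : p = i - 1
    · have hp1 : p + 1 = i := by omega
      rw [hp1]
      by_cases c : PySem.Int.mod i lado ≠ 0 <;> simp [c, hp]
    · have hni : p + 1 ≠ i := by omega
      simp [hni, hp]
  unfold pvG
  rw [h2, h3, h4, h5]

lemma pvS_count (lado : Int) (ps : List Int) (i : Int) :
    pvS lado ps i
      = (ps.count i : Int) + (ps.count (i + lado) : Int) + (ps.count (i - lado) : Int)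
        + (if PySem.Int.mod (i + 1) lado ≠ 0 then (ps.count (i + 1) : Int) else 0)
        + (if PySem.Int.mod i lado ≠ 0 then (ps.count (i - 1) : Int) else 0) := by
  induction ps with
  | nil => simp [pvS]
  | cons p ps ih =>
    simp only [pvS, List.map_cons, List.sum_cons] at ih ⊢
    rw [ih, pvG_eq]
    simp only [List.count_cons, beq_iff_eq]
    push_cast
    by_cases c1 : PySem.Int.mod (i + 1) lado ≠ 0 <;> by_cases c2 : PySem.Int.mod i lado ≠ 0 <;>
      simp only [c1, c2, if_true, if_false, not_false_eq_true, ne_eq] <;>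
      split_ifs <;> omega

-- the common target: cell j's final value
def pvT (lado : Int) (ps : List Int) (j : Int) : Int := pvS lado ps j % 10

lemma pvCellValue_eq (passos : List Int) (lado i : Int) :
    pvCellValue (passos.foldl (fun d p => d.insert p (d.getD p 0 + 1)) PySem.Dict.empty) lado i
      = pvT lado passos i := by
  unfold pvCellValue pvT
  dsimp only
  rw [PySem.Dict.getD_foldl_insert_add_one, PySem.Dict.getD_foldl_insert_add_one,
    PySem.Dict.getD_foldl_insert_add_one, PySem.Dict.getD_foldl_insert_add_one,
    PySem.Dict.getD_foldl_insert_add_one]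
  simp only [PySem.Dict.getD_empty, zero_add]
  rw [pvS_count]
  split_ifs <;> ring_nf

-- setting one in-grid cell to its target value extends the mask by that cell
lemma pvSetCell (area : Int) (t : Int → Int) (mask : Int → Bool) (i : Int) :
    (if 0 ≤ i ∧ i < area then
        ((List.range area.toNat).map (fun (k : Nat) => if mask (k : Int) then t (k : Int) else 0)).set i.toNat (t i)
      else ((List.range area.toNat).map (fun (k : Nat) => if mask (k : Int) then t (k : Int) else 0)))
      = (List.range area.toNat).map (fun (k : Nat) => if (mask (k : Int) || (i == (k : Int))) then t (k : Int) else 0) := by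
  split_ifs with hin
  · obtain ⟨h0, h1⟩ := hin
    have hlt : i.toNat < area.toNat := by omega
    apply List.ext_getElem
    · simp
    · intro k hk hk'
      simp only [List.length_map, List.length_range] at hk'
      rw [List.getElem_set]
      simp only [List.getElem_map, List.getElem_range]
      by_cases hik : i.toNat = k
      · have hi : i = (k : Int) := by omega
        rw [if_pos hik, if_pos (by simp [hi])]
        rw [hi]
      · have : (i == (k : Int)) = false := by simp; omega
        rw [if_neg hik, this, Bool.or_false]
  · apply List.map_congr_left
    intro k hk
    simp only [List.mem_range] at hk
    have : (i == (k : Int)) = false := by simp; omega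
    rw [this, Bool.or_false]

-- inner loop over a list of candidate cells, writing values that agree with the target
lemma pvFoldCells (area : Int) (t : Int → Int) (w : Int → Int) (hw : ∀ i, w i = t i)
    (ts : List Int) (mask : Int → Bool) :
    ts.foldl (fun res i => if 0 ≤ i ∧ i < area then res.set i.toNat (w i) else res)
        ((List.range area.toNat).map (fun (k : Nat) => if mask (k : Int) then t (k : Int) else 0))
      = (List.range area.toNat).map
          (fun (k : Nat) => if (mask (k : Int) || ts.any (fun i => i == (k : Int))) then t (k : Int) else 0) := by
  induction ts generalizing mask with
  | nil => simp
  | cons c ts ih =>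
    rw [List.foldl_cons, hw, pvSetCell area t mask c,
      ih (fun k => mask k || (c == k))]
    refine List.map_congr_left (fun k hk => ?_)
    simp [Bool.or_assoc]

-- a cell no step can reach has target 0
lemma pvT_zero (lado : Int) (ps : List Int) (j : Int)
    (h : ∀ p ∈ ps, ¬ (p = j ∨ p - 1 = j ∨ p + 1 = j ∨ p - lado = j ∨ p + lado = j)) :
    pvT lado ps j = 0 := by
  unfold pvT pvS
  have : ∀ p ∈ ps, pvG lado p j = 0 := by
    intro p hp
    have hnp := h p hp
    push Not at hnp
    obtain ⟨n1, n2, n3, n4, n5⟩ := hnp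
    unfold pvG
    rw [if_neg n1, if_neg (by omega : ¬ (p - lado = j)), if_neg (by omega : ¬ (p + lado = j)),
      if_neg (by simp [n2]), if_neg (by simp [n3])]
    norm_num
  have hz : ps.map (fun p => pvG lado p j) = ps.map (fun _ => (0:Int)) :=
    List.map_congr_left this
  rw [hz]
  simp

lemma pv_eq (passos : List Int) (lado : Int) :
    numpuzz passos lado = numpuzz_alt passos lado := by
  unfold numpuzz numpuzz_alt
  dsimp only
  have hbase : List.replicate (lado * lado).toNat (0:Int)
      = (List.range (lado * lado).toNat).map (fun j => (0:Int) % 10) := by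
    simp [List.map_const']
  -- A's side: the scatter loop computes the target at every cell
  rw [hbase, pv_foldA]
  simp only [zero_add]
  -- B's side: the candidate-cell gather
  have hbase' : (List.range (lado * lado).toNat).map (fun _ : Nat => (0:Int) % 10)
      = (List.range (lado * lado).toNat).map
          (fun (k : Nat) => if (false : Bool) then pvT lado passos (k : Int) else 0) := by
    simp
  rw [hbase']
  have houter : ∀ (l : List Int) (mask : Int → Bool),
      l.foldl (fun res p =>
          [p, p - 1, p + 1, p - lado, p + lado].foldl (fun res i =>
            if 0 ≤ i ∧ i < lado * lado then
              res.set i.toNat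
                (pvCellValue (passos.foldl (fun d p => d.insert p (d.getD p 0 + 1)) PySem.Dict.empty) lado i)
            else res) res)
        ((List.range (lado * lado).toNat).map
          (fun (k : Nat) => if mask (k : Int) then pvT lado passos (k : Int) else 0))
      = (List.range (lado * lado).toNat).map
          (fun (k : Nat) => if (mask (k : Int) || l.any (fun p =>
              [p, p - 1, p + 1, p - lado, p + lado].any (fun i => i == (k : Int)))) then
            pvT lado passos (k : Int) else 0) := by
    intro l
    induction l with
    | nil => intro mask; simp
    | cons p l ihl =>
      intro mask
      rw [List.foldl_cons,
        pvFoldCells (lado * lado) (pvT lado passos) _ (pvCellValue_eq passos lado)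
          [p, p - 1, p + 1, p - lado, p + lado] mask,
        ihl (fun k => mask k || [p, p - 1, p + 1, p - lado, p + lado].any (fun i => i == k))]
      refine List.map_congr_left (fun k hk => ?_)
      simp [Bool.or_assoc]
  rw [houter ((passos.foldl (fun (d : PySem.Dict Int Int) p => d.insert p (d.getD p 0 + 1)) PySem.Dict.empty).keys)
    (fun _ => false)]
  refine List.map_congr_left (fun k hk => ?_)
  simp only [Bool.false_or, pvT]
  split_ifs with htouch
  · rfl
  · refine pvT_zero lado passos (k : Int) ?_
    intro p hp
    have hpk : p ∈ (passos.foldl (fun (d : PySem.Dict Int Int) p => d.insert p (d.getD p 0 + 1)) PySem.Dict.empty).keys := by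
      simp only [PySem.Dict.foldl_insert_getD_add_one_eq_counter, PySem.Dict.keys_counter,
        PySem.Set.mem_ofList]
      exact hp
    intro hrel
    have hc : (((passos.foldl (fun (d : PySem.Dict Int Int) p => d.insert p (d.getD p 0 + 1)) PySem.Dict.empty).keys).any (fun p =>
        [p, p - 1, p + 1, p - lado, p + lado].any (fun i => i == (k : Int)))) = true := by
      rw [List.any_eq_true]
      refine ⟨p, hpk, ?_⟩
      simp only [List.any_cons, List.any_nil, Bool.or_false]
      rcases hrel with h | h | h | h | h <;> simp [h]
    exact htouch hc

-- ===== VERDICT (by name: the statement is the Claim_ definition above) =====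
theorem numpuzz_spec : Claim_equal_numpuzz := by
  intro passos lado _ _
  unfold Spec_numpuzz
  exact pv_eq passos lado
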